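-- pv_equiv track=rewrite | github.com/tsuru7/algorithm-study | AtCoder/ABC/201-300/ABC276/E-2.py | solve
-- ===== SOURCE A (Python) =====
-- from collections import deque
--
-- def solve(h,w,cmap):
--     def to1d(row, col):
--         return row * w + col
--
--     for row in range(h):
--         for col in range(w):
--             if cmap[row][col] == 'S':
--                 srow = row
--                 scol = col
--
--     for sr, sc in [(srow-1, scol), (srow+1, scol), (srow, scol-1), (srow, scol+1)]:
--         if not (0 <= sr < h and 0 <= sc < w and cmap[sr][sc] == '.'):
--             continue
--         queue = deque()
--         visited = [-1 for _ in range(h*w)]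
--         queue.append((sr, sc))
--         visited[to1d(sr, sc)] = 0
--         while len(queue) > 0:
--             ur, uc = queue.popleft()
--             for dr, dc in [(-1, 0), (1, 0), (0, -1), (0, 1)]:
--                 vr = ur + dr
--                 vc = uc + dc
--                 if 0 <= vr < h and 0 <= vc < w and cmap[vr][vc] == '.' and visited[to1d(vr, vc)] == -1:
--                     visited[to1d(vr, vc)] = visited[to1d(ur, uc)] + 1
--                     queue.append((vr, vc))
--         for r, c in [(srow-1, scol), (srow+1, scol), (srow, scol-1), (srow, scol+1)]:
--             if 0 <= r < h and 0 <= c < w and visited[to1d(r, c)] > 0: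
--                 return 'Yes'
--     return 'No'
-- ===== SOURCE B (Python) =====
-- def solve(h, w, cmap):
--     # B: instead of one BFS per open neighbor of S with a queue and a distance
--     # array, compute each neighbor's '.'-component by round-based set
--     # saturation and answer Yes iff two distinct open neighbors share one.
--     s = None
--     for r in range(h):
--         for c in range(w):
--             if cmap[r][c] == 'S':
--                 s = (r, c)
--     sr, sc = s
--
--     def is_open(r, c):
--         return 0 <= r < h and 0 <= c < w and cmap[r][c] == '.'
--
--     nbrs = [(r, c) for (r, c) in ((sr - 1, sc), (sr + 1, sc), (sr, sc - 1), (sr, sc + 1))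
--             if is_open(r, c)]
--
--     def component(start):
--         comp = {start}
--         for _ in range(h * w):
--             new = comp | {(r + dr, c + dc) for (r, c) in comp
--                           for (dr, dc) in ((-1, 0), (1, 0), (0, -1), (0, 1))
--                           if is_open(r + dr, c + dc)}
--             if new == comp:
--                 break
--             comp = new
--         return comp
--
--     for i, n in enumerate(nbrs):
--         comp = component(n)
--         for j, m in enumerate(nbrs):
--             if j != i and m in comp:
--                 return 'Yes'
--     return 'No'
-- ===== Notes on version B (the rewrite author's own statement) =====
-- stated objective: alternative
-- what changed: A runs a separate queue-based BFS with a distance array for each open neighbor of S; B finds the open neighbors, computes each one's '.'-component by round-based set saturation (repeatedly unioning in the open 4-neighbors of the current set until it stops growing), and answers Yes iff two distinct open neighbors land in the same component.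
import Mathlib
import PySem

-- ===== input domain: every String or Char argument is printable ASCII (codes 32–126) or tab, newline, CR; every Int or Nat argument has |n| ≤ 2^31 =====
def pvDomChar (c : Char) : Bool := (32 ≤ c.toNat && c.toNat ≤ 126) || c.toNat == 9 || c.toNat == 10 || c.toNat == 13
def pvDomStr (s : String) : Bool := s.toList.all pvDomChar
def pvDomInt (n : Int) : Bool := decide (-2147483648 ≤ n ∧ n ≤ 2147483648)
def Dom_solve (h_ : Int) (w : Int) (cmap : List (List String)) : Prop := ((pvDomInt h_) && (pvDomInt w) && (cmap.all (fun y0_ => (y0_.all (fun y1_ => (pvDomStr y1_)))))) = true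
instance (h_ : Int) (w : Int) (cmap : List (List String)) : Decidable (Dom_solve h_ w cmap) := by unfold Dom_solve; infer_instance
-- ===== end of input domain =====

-- B replaces A's per-neighbor BFS (queue + distance array) by a round-based
-- set-saturation component computation; same return value on Pre_solve.

-- ===== PORT A =====
def aCell (cmap : List (List String)) (r c : Int) : Option String :=
  (PySem.List.pyGet? cmap r).bind (fun row => PySem.List.pyGet? row c)

def aFindS (h_ w : Int) (cmap : List (List String)) : Option (Int × Int) :=
  (PySem.List.pyRange 0 h_ 1).foldl (fun acc row =>
    (PySem.List.pyRange 0 w 1).foldl (fun acc2 col =>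
      if aCell cmap row col == some "S" then some (row, col) else acc2) acc) none

def aNbrs (sr sc : Int) : List (Int × Int) := [(sr - 1, sc), (sr + 1, sc), (sr, sc - 1), (sr, sc + 1)]

def aDirs : List (Int × Int) := [(-1, 0), (1, 0), (0, -1), (0, 1)]

def aRelax (h_ w : Int) (cmap : List (List String)) (u : Int × Int)
    (st : List Int × List (Int × Int)) (d : Int × Int) : List Int × List (Int × Int) :=
  let vr := u.1 + d.1
  let vc := u.2 + d.2
  if decide (0 ≤ vr) && decide (vr < h_) && decide (0 ≤ vc) && decide (vc < w)
      && (aCell cmap vr vc == some ".") && (PySem.List.pyGetD st.1 (vr * w + vc) (-2) == -1) then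
    (PySem.List.pySetD st.1 (vr * w + vc) (PySem.List.pyGetD st.1 (u.1 * w + u.2) (-2) + 1),
     st.2 ++ [(vr, vc)])
  else st

def aStep (h_ w : Int) (cmap : List (List String)) (u : Int × Int)
    (st : List Int × List (Int × Int)) : List Int × List (Int × Int) :=
  aDirs.foldl (aRelax h_ w cmap u) st

-- the while loop; fuel only makes the recursion structural (proved sufficient below)
def aBFS (h_ w : Int) (cmap : List (List String)) :
    Nat → List Int → List (Int × Int) → List Int
  | 0, vis, _ => vis
  | _ + 1, vis, [] => vis
  | fuel + 1, vis, u :: q =>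
    let st := aStep h_ w cmap u (vis, q)
    aBFS h_ w cmap fuel st.1 st.2

def aTry (h_ w : Int) (cmap : List (List String)) (srow scol : Int) (n : Int × Int) : Bool :=
  if decide (0 ≤ n.1) && decide (n.1 < h_) && decide (0 ≤ n.2) && decide (n.2 < w)
      && (aCell cmap n.1 n.2 == some ".") then
    let vis0 := List.replicate (h_ * w).toNat (-1 : Int)
    let vis1 := PySem.List.pySetD vis0 (n.1 * w + n.2) 0
    let vis := aBFS h_ w cmap (4 * (h_ * w).toNat + 4) vis1 [n]
    (aNbrs srow scol).any (fun p =>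
      decide (0 ≤ p.1) && decide (p.1 < h_) && decide (0 ≤ p.2) && decide (p.2 < w)
        && decide (0 < PySem.List.pyGetD vis (p.1 * w + p.2) (-2)))
  else false

def solve (h_ : Int) (w : Int) (cmap : List (List String)) : String :=
  match aFindS h_ w cmap with
  | none => "No"   -- Python raises NameError here; excluded by Pre_solve
  | some (srow, scol) =>
    if (aNbrs srow scol).any (fun n => aTry h_ w cmap srow scol n) then "Yes" else "No"

-- ===== PORT B =====
def bCell (cmap : List (List String)) (r c : Int) : Option String :=
  (PySem.List.pyGet? cmap r).bind (fun row => PySem.List.pyGet? row c)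

def bIsOpen (h_ w : Int) (cmap : List (List String)) (r c : Int) : Bool :=
  decide (0 ≤ r) && decide (r < h_) && decide (0 ≤ c) && decide (c < w)
    && (bCell cmap r c == some ".")

def bFindS (h_ w : Int) (cmap : List (List String)) : Option (Int × Int) :=
  (PySem.List.pyRange 0 h_ 1).foldl (fun acc row =>
    (PySem.List.pyRange 0 w 1).foldl (fun acc2 col =>
      if bCell cmap row col == some "S" then some (row, col) else acc2) acc) none

def bDirs : List (Int × Int) := [(-1, 0), (1, 0), (0, -1), (0, 1)]

def bAdds (h_ w : Int) (cmap : List (List String)) (comp : PySem.Set (Int × Int)) :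
    PySem.Set (Int × Int) :=
  PySem.Set.ofList (comp.flatMap (fun p =>
    bDirs.filterMap (fun d =>
      if bIsOpen h_ w cmap (p.1 + d.1) (p.2 + d.2) then some (p.1 + d.1, p.2 + d.2) else none)))

def bSat (h_ w : Int) (cmap : List (List String)) :
    Nat → PySem.Set (Int × Int) → PySem.Set (Int × Int)
  | 0, comp => comp
  | f + 1, comp =>
    let nw := PySem.Set.union comp (bAdds h_ w cmap comp)
    if PySem.Set.equal nw comp then comp else bSat h_ w cmap f nw

def bComponent (h_ w : Int) (cmap : List (List String)) (start : Int × Int) :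
    PySem.Set (Int × Int) :=
  bSat h_ w cmap (h_ * w).toNat (PySem.Set.ofList [start])

def solve_alt (h_ : Int) (w : Int) (cmap : List (List String)) : String :=
  match bFindS h_ w cmap with
  | none => "No"   -- Python raises TypeError here; excluded by Pre_solve
  | some (sr, sc) =>
    let nbrs := [(sr - 1, sc), (sr + 1, sc), (sr, sc - 1), (sr, sc + 1)].filter
      (fun p => bIsOpen h_ w cmap p.1 p.2)
    if (PySem.List.enumerate nbrs).any (fun inpair =>
        let comp := bComponent h_ w cmap inpair.2
        (PySem.List.enumerate nbrs).any (fun jmpair =>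
          decide (jmpair.1 ≠ inpair.1) && PySem.Set.contains comp jmpair.2))
    then "Yes" else "No"

-- ===== PRECONDITION & SPEC =====
-- Pre_solve excludes exactly the inputs where A raises: an IndexError when the
-- first h rows are missing or shorter than w, and a NameError when no 'S' cell
-- exists in the h×w region (srow/scol stay unbound).
def Pre_solve (h_ : Int) (w : Int) (cmap : List (List String)) : Prop :=
  h_.toNat ≤ cmap.length ∧
  (∀ row ∈ cmap.take h_.toNat, w.toNat ≤ row.length) ∧
  (∃ row ∈ cmap.take h_.toNat, "S" ∈ row.take w.toNat)
instance (h_ : Int) (w : Int) (cmap : List (List String)) : Decidable (Pre_solve h_ w cmap) := by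
  unfold Pre_solve; infer_instance

def pvWitness_solve : Int × Int × List (List String) := (2, 2, [["S", "."], [".", "."]])

def Spec_solve (h_ : Int) (w : Int) (cmap : List (List String)) (out : String) : Prop := out = solve_alt h_ w cmap
instance (h_ : Int) (w : Int) (cmap : List (List String)) (out : String) : Decidable (Spec_solve h_ w cmap out) := by unfold Spec_solve; infer_instance

-- ===== CLAIM (what is proved, stated in full; the proofs are below) =====
def Claim_equal_solve : Prop := ∀ (h_ : Int) (w : Int) (cmap : List (List String)), Dom_solve h_ w cmap → Pre_solve h_ w cmap → Spec_solve h_ w cmap (solve h_ w cmap)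

-- ===== LEMMAS AND PROOFS =====

-- grid positions, openness, one step of the 4-neighbour relation, reachability
def InR (h_ w : Int) (p : Int × Int) : Prop := 0 ≤ p.1 ∧ p.1 < h_ ∧ 0 ≤ p.2 ∧ p.2 < w

def Opn (h_ w : Int) (cmap : List (List String)) (p : Int × Int) : Prop :=
  bIsOpen h_ w cmap p.1 p.2 = true

def Stp (h_ w : Int) (cmap : List (List String)) (p q : Int × Int) : Prop :=
  (q.1 - p.1, q.2 - p.2) ∈ aDirs ∧ Opn h_ w cmap q

def Reach (h_ w : Int) (cmap : List (List String)) : Int × Int → Int × Int → Prop :=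
  Relation.ReflTransGen (Stp h_ w cmap)

lemma opn_inR (h_ w : Int) (cmap : List (List String)) (p : Int × Int)
    (h : Opn h_ w cmap p) : InR h_ w p := by
  unfold Opn bIsOpen at h
  simp only [Bool.and_eq_true, decide_eq_true_eq] at h
  exact ⟨h.1.1.1.1, h.1.1.1.2, h.1.1.2, h.1.2⟩

lemma code_bounds (h_ w : Int) (p : Int × Int) (h : InR h_ w p) :
    0 ≤ p.1 * w + p.2 ∧ p.1 * w + p.2 < h_ * w := by
  obtain ⟨h1, h2, h3, h4⟩ := h
  constructor
  · nlinarith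
  · nlinarith

lemma code_inj (h_ w : Int) (p q : Int × Int) (hp : InR h_ w p) (hq : InR h_ w q)
    (h : p.1 * w + p.2 = q.1 * w + q.2) : p = q := by
  obtain ⟨hp1, hp2, hp3, hp4⟩ := hp
  obtain ⟨hq1, hq2, hq3, hq4⟩ := hq
  have hw : 0 < w := lt_of_le_of_lt hp3 hp4
  have h12 : p.1 = q.1 := by
    by_contra hne
    rcases lt_or_gt_of_ne hne with hlt | hlt
    · have : p.1 + 1 ≤ q.1 := hlt
      nlinarith
    · have : q.1 + 1 ≤ p.1 := hlt
      nlinarith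
  have : p.2 = q.2 := by rw [h12] at h; linarith
  exact Prod.ext h12 this

-- the visited-array entry of a cell
def vAt (w : Int) (vis : List Int) (p : Int × Int) : Int :=
  PySem.List.pyGetD vis (p.1 * w + p.2) (-2)


lemma toNat_lt_toNat_code (h_ w : Int) (p : Int × Int) (h : InR h_ w p) :
    (p.1 * w + p.2).toNat < (h_ * w).toNat := by
  have := code_bounds h_ w p h
  omega

lemma vAt_set_cases (h_ w : Int) (vis : List Int) (v p : Int × Int) (val : Int)
    (hlen : vis.length = (h_ * w).toNat) (hv : InR h_ w v) (hp : InR h_ w p) :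
    vAt w (PySem.List.pySetD vis (v.1 * w + v.2) val) p
      = if p = v then val else vAt w vis p := by
  have hcv := code_bounds h_ w v hv
  have hcp := code_bounds h_ w p hp
  have hlv : (v.1 * w + v.2).toNat < vis.length := by rw [hlen]; exact toNat_lt_toNat_code h_ w v hv
  have hlp : (p.1 * w + p.2).toNat < vis.length := by rw [hlen]; exact toNat_lt_toNat_code h_ w p hp
  unfold vAt
  rw [PySem.List.pySetD_of_nonneg _ _ hcv.1, PySem.List.pyGetD_of_nonneg _ _ hcp.1,
    PySem.List.pyGetD_of_nonneg _ _ hcp.1]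
  by_cases hpv : p = v
  · subst hpv
    simp [List.getD_eq_getElem?_getD, List.getElem?_set_self hlv]
  · have hne : (v.1 * w + v.2).toNat ≠ (p.1 * w + p.2).toNat := by
      intro hEq
      exact hpv (code_inj h_ w p v hp hv (by omega))
    simp [hpv, List.getD_eq_getElem?_getD, List.getElem?_set_ne hne]

lemma vAt_mono_set (h_ w : Int) (vis : List Int) (v p : Int × Int) (val : Int)
    (hlen : vis.length = (h_ * w).toNat) (hv : InR h_ w v) (hp : InR h_ w p)
    (hvold : vAt w vis v = -1) (hge : 0 ≤ vAt w vis p) :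
    vAt w (PySem.List.pySetD vis (v.1 * w + v.2) val) p = vAt w vis p := by
  rw [vAt_set_cases h_ w vis v p val hlen hv hp]
  have hne : p ≠ v := by
    intro e
    rw [e, hvold] at hge
    omega
  simp [hne]

lemma vAt_replicate (h_ w : Int) (p : Int × Int) (hp : InR h_ w p) :
    vAt w (List.replicate (h_ * w).toNat (-1 : Int)) p = -1 := by
  have hcp := code_bounds h_ w p hp
  unfold vAt
  rw [PySem.List.pyGetD_of_nonneg _ _ hcp.1]
  have : (p.1 * w + p.2).toNat < (h_ * w).toNat := toNat_lt_toNat_code h_ w p hp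
  simp [List.getD_eq_getElem?_getD, this]


-- the BFS loop invariant: queue entries are visited open cells, entry of the
-- start is 0, every other in-range entry is -1 or ≥ 1, non-open cells are
-- unvisited, visited cells are reachable, and every visited cell is pending or
-- has all its step-successors visited
structure BInv (h_ w : Int) (cmap : List (List String)) (n : Int × Int)
    (vis : List Int) (q : List (Int × Int)) : Prop where
  len : vis.length = (h_ * w).toNat
  qgood : ∀ p ∈ q, Opn h_ w cmap p ∧ 0 ≤ vAt w vis p
  start : vAt w vis n = 0
  lb : ∀ p, InR h_ w p → -1 ≤ vAt w vis p
  nz : ∀ p, InR h_ w p → p ≠ n → vAt w vis p ≠ 0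
  unop : ∀ p, InR h_ w p → ¬ Opn h_ w cmap p → vAt w vis p = -1
  sound : ∀ p, Opn h_ w cmap p → 0 ≤ vAt w vis p → Reach h_ w cmap n p
  front : ∀ p, Opn h_ w cmap p → 0 ≤ vAt w vis p →
    p ∈ q ∨ ∀ r, Stp h_ w cmap p r → 0 ≤ vAt w vis r

lemma relax_one (h_ w : Int) (cmap : List (List String)) (n u : Int × Int)
    (hn : Opn h_ w cmap n) (hu : Opn h_ w cmap u) (d : Int × Int) (hd : d ∈ aDirs)
    (vis : List Int) (q : List (Int × Int)) (hI : BInv h_ w cmap n vis (u :: q)) :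
    BInv h_ w cmap n (aRelax h_ w cmap u (vis, q) d).1
        (u :: (aRelax h_ w cmap u (vis, q) d).2) ∧
    (∀ p, InR h_ w p → 0 ≤ vAt w vis p →
      vAt w (aRelax h_ w cmap u (vis, q) d).1 p = vAt w vis p) ∧
    (Opn h_ w cmap (u.1 + d.1, u.2 + d.2) →
      0 ≤ vAt w (aRelax h_ w cmap u (vis, q) d).1 (u.1 + d.1, u.2 + d.2)) ∧
    4 * (aRelax h_ w cmap u (vis, q) d).1.count (-1) + (aRelax h_ w cmap u (vis, q) d).2.length
      ≤ 4 * vis.count (-1) + q.length := by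
  have hvalu : 0 ≤ vAt w vis u := (hI.qgood u List.mem_cons_self).2
  set v : Int × Int := (u.1 + d.1, u.2 + d.2) with hvdef
  have hrelax : aRelax h_ w cmap u (vis, q) d =
      if (bIsOpen h_ w cmap v.1 v.2 && (vAt w vis v == -1)) = true
      then (PySem.List.pySetD vis (v.1 * w + v.2) (vAt w vis u + 1), q ++ [v])
      else (vis, q) := rfl
  by_cases hg : (bIsOpen h_ w cmap v.1 v.2 && (vAt w vis v == -1)) = true
  · simp only [Bool.and_eq_true, beq_iff_eq] at hg
    obtain ⟨hOpn, hold⟩ := hg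
    have hOpn' : Opn h_ w cmap v := hOpn
    have hvI : InR h_ w v := opn_inR h_ w cmap v hOpn'
    have hlen := hI.len
    have hset := fun p hp => vAt_set_cases h_ w vis v p (vAt w vis u + 1) hlen hvI hp
    have hmono := fun p hp hge => vAt_mono_set h_ w vis v p (vAt w vis u + 1) hlen hvI hp hold hge
    have hstep : Stp h_ w cmap u v := by
      refine ⟨?_, hOpn'⟩
      show (u.1 + d.1 - u.1, u.2 + d.2 - u.2) ∈ aDirs
      rw [add_sub_cancel_left, add_sub_cancel_left]
      exact hd
    rw [hrelax, if_pos (by simp [hOpn, hold])]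
    dsimp only
    refine ⟨⟨?_, ?_, ?_, ?_, ?_, ?_, ?_, ?_⟩, ?_, ?_, ?_⟩
    · simp [PySem.List.length_pySetD, hlen]
    · intro p hp
      rcases List.mem_cons.1 hp with h1 | h1
      · rw [h1]
        exact ⟨hu, by rw [hmono u (opn_inR h_ w cmap u hu) hvalu]; exact hvalu⟩
      rcases List.mem_append.1 h1 with h2 | h2
      · obtain ⟨ho, hv2⟩ := hI.qgood p (List.mem_cons_of_mem _ h2)
        exact ⟨ho, by rw [hmono p (opn_inR h_ w cmap p ho) hv2]; exact hv2⟩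
      · have hp2 : p = v := by simpa using h2
        subst hp2
        refine ⟨hOpn', ?_⟩
        rw [hset v hvI]
        simp
        omega
    · have hnv : n ≠ v := by
        intro e
        rw [← e, hI.start] at hold
        omega
      rw [hset n (opn_inR h_ w cmap n hn), if_neg hnv]
      exact hI.start
    · intro p hp
      rw [hset p hp]
      split
      · omega
      · exact hI.lb p hp
    · intro p hp hpn
      rw [hset p hp]
      split
      · omega
      · exact hI.nz p hp hpn
    · intro p hp hno
      rw [hset p hp]
      split
      · rename_i he
        exact absurd (he ▸ hOpn') hno
      · exact hI.unop p hp hno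
    · intro p hOp hge
      have hpI := opn_inR h_ w cmap p hOp
      rw [hset p hpI] at hge
      by_cases hpv : p = v
      · subst hpv
        exact (hI.sound u hu hvalu).tail hstep
      · rw [if_neg hpv] at hge
        exact hI.sound p hOp hge
    · intro p hOp hge
      have hpI := opn_inR h_ w cmap p hOp
      rw [hset p hpI] at hge
      by_cases hpv : p = v
      · subst hpv
        exact Or.inl (by simp)
      · rw [if_neg hpv] at hge
        rcases hI.front p hOp hge with hin | hcl
        · rcases List.mem_cons.1 hin with h1 | h1
          · exact Or.inl (by simp [h1])
          · exact Or.inl (by simp [h1])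
        · refine Or.inr ?_
          intro r hr
          have hge2 := hcl r hr
          rw [hmono r (opn_inR h_ w cmap r hr.2) hge2]
          exact hge2
    · intro p hp hge
      exact hmono p hp hge
    · intro _
      rw [hset v hvI]
      simp
      omega
    · have hcv := code_bounds h_ w v hvI
      have hidx : (v.1 * w + v.2).toNat < vis.length := by
        rw [hlen]; exact toNat_lt_toNat_code h_ w v hvI
      have hgetv : vis[(v.1 * w + v.2).toNat] = -1 := by
        have := PySem.List.pyGetD_eq_getElem vis (-2) hcv.1 (by omega)
        rw [← this]
        exact hold
      have hcount : (-1 : Int) ∈ vis := hgetv ▸ List.getElem_mem hidx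
      have hpos : 0 < vis.count (-1) := List.count_pos_iff.2 hcount
      rw [PySem.List.pySetD_of_nonneg _ _ hcv.1, List.count_set hidx]
      simp only [hgetv, List.length_append, List.length_cons, List.length_nil]
      have hne : ¬((vAt w vis u + 1 : Int) == -1) = true := by
        simp
        omega
      simp [hne]
      omega
  · rw [hrelax, if_neg hg]
    dsimp only
    refine ⟨hI, fun p _ _ => rfl, ?_, le_refl _⟩
    intro hOpn
    simp only [Bool.and_eq_true, beq_iff_eq] at hg
    have : ¬ vAt w vis v = -1 := by
      intro he
      exact hg ⟨hOpn, he⟩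
    have := hI.lb v (opn_inR h_ w cmap v hOpn)
    omega


lemma relax_fold (h_ w : Int) (cmap : List (List String)) (n u : Int × Int)
    (hn : Opn h_ w cmap n) (hu : Opn h_ w cmap u) (D : List (Int × Int)) :
    (∀ d ∈ D, d ∈ aDirs) → ∀ vis q, BInv h_ w cmap n vis (u :: q) →
    BInv h_ w cmap n (D.foldl (aRelax h_ w cmap u) (vis, q)).1
        (u :: (D.foldl (aRelax h_ w cmap u) (vis, q)).2) ∧
    (∀ p, InR h_ w p → 0 ≤ vAt w vis p →
      vAt w (D.foldl (aRelax h_ w cmap u) (vis, q)).1 p = vAt w vis p) ∧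
    (∀ d ∈ D, Opn h_ w cmap (u.1 + d.1, u.2 + d.2) →
      0 ≤ vAt w (D.foldl (aRelax h_ w cmap u) (vis, q)).1 (u.1 + d.1, u.2 + d.2)) ∧
    4 * (D.foldl (aRelax h_ w cmap u) (vis, q)).1.count (-1)
        + (D.foldl (aRelax h_ w cmap u) (vis, q)).2.length
      ≤ 4 * vis.count (-1) + q.length := by
  induction D with
  | nil =>
    intro _ vis q hI
    exact ⟨hI, fun p _ _ => rfl, by simp, le_refl _⟩
  | cons d D ih =>
    intro hD vis q hI
    have hd : d ∈ aDirs := hD d List.mem_cons_self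
    obtain ⟨hI1, hmono1, hcov1, hmu1⟩ := relax_one h_ w cmap n u hn hu d hd vis q hI
    have hfold : (d :: D).foldl (aRelax h_ w cmap u) (vis, q)
        = D.foldl (aRelax h_ w cmap u)
            ((aRelax h_ w cmap u (vis, q) d).1, (aRelax h_ w cmap u (vis, q) d).2) := by
      simp [List.foldl_cons]
    obtain ⟨hI2, hmono2, hcov2, hmu2⟩ :=
      ih (fun e he => hD e (List.mem_cons_of_mem _ he))
        (aRelax h_ w cmap u (vis, q) d).1 (aRelax h_ w cmap u (vis, q) d).2 hI1
    rw [hfold]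
    refine ⟨hI2, ?_, ?_, le_trans hmu2 hmu1⟩
    · intro p hp hge
      rw [hmono2 p hp (by rw [hmono1 p hp hge]; exact hge), hmono1 p hp hge]
    · intro e he hOpn
      rcases List.mem_cons.1 he with h1 | h1
      · subst h1
        have hvI : InR h_ w (u.1 + e.1, u.2 + e.2) := opn_inR h_ w cmap _ hOpn
        have h0 := hcov1 hOpn
        rw [hmono2 _ hvI h0]
        exact h0
      · exact hcov2 e h1 hOpn

lemma step_inv (h_ w : Int) (cmap : List (List String)) (n u : Int × Int)
    (hn : Opn h_ w cmap n) (hu : Opn h_ w cmap u) (vis : List Int) (q : List (Int × Int))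
    (hI : BInv h_ w cmap n vis (u :: q)) :
    BInv h_ w cmap n (aStep h_ w cmap u (vis, q)).1 (aStep h_ w cmap u (vis, q)).2 ∧
    4 * (aStep h_ w cmap u (vis, q)).1.count (-1) + (aStep h_ w cmap u (vis, q)).2.length
      ≤ 4 * vis.count (-1) + q.length := by
  obtain ⟨hI1, _, hcov, hmu⟩ :=
    relax_fold h_ w cmap n u hn hu aDirs (fun d hd => hd) vis q hI
  refine ⟨⟨hI1.len, ?_, hI1.start, hI1.lb, hI1.nz, hI1.unop, hI1.sound, ?_⟩, hmu⟩
  · intro p hp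
    exact hI1.qgood p (List.mem_cons_of_mem _ hp)
  · intro p hOp hge
    rcases hI1.front p hOp hge with hin | hcl
    · rcases List.mem_cons.1 hin with h1 | h1
      · refine Or.inr ?_
        intro r hr
        obtain ⟨hmem, hOr⟩ := hr
        have he : (u.1 + (r.1 - u.1, r.2 - u.2).1, u.2 + (r.1 - u.1, r.2 - u.2).2) = r := by
          simp
        have := hcov (r.1 - u.1, r.2 - u.2) (by rw [h1] at hmem; exact hmem)
        rw [he] at this
        exact this hOr
      · exact Or.inl h1
    · exact Or.inr hcl

lemma bfs_loop (h_ w : Int) (cmap : List (List String)) (n : Int × Int)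
    (hn : Opn h_ w cmap n) :
    ∀ (fuel : Nat) (vis : List Int) (q : List (Int × Int)), BInv h_ w cmap n vis q →
    4 * vis.count (-1) + q.length < fuel →
    BInv h_ w cmap n (aBFS h_ w cmap fuel vis q) [] := by
  intro fuel
  induction fuel with
  | zero => intro vis q _ hmu; omega
  | succ f ih =>
    intro vis q hI hmu
    cases q with
    | nil => exact hI
    | cons u q =>
      have hu : Opn h_ w cmap u := (hI.qgood u List.mem_cons_self).1
      obtain ⟨hI1, hmu1⟩ := step_inv h_ w cmap n u hn hu vis q hI
      show BInv h_ w cmap n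
        (aBFS h_ w cmap f (aStep h_ w cmap u (vis, q)).1 (aStep h_ w cmap u (vis, q)).2) []
      apply ih _ _ hI1
      simp only [List.length_cons] at hmu
      omega

lemma reach_opn (h_ w : Int) (cmap : List (List String)) (n p : Int × Int)
    (hn : Opn h_ w cmap n) (hR : Reach h_ w cmap n p) : Opn h_ w cmap p := by
  induction hR with
  | refl => exact hn
  | tail _ hst _ => exact hst.2

lemma bfs_char (h_ w : Int) (cmap : List (List String)) (n : Int × Int)
    (hn : Opn h_ w cmap n) (p : Int × Int) (hp : InR h_ w p) :
    (0 < vAt w (aBFS h_ w cmap (4 * (h_ * w).toNat + 4)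
        (PySem.List.pySetD (List.replicate (h_ * w).toNat (-1 : Int)) (n.1 * w + n.2) 0)
        [n]) p
      ↔ Opn h_ w cmap p ∧ Reach h_ w cmap n p ∧ p ≠ n) := by
  have hnI : InR h_ w n := opn_inR h_ w cmap n hn
  have hlen0 : (List.replicate (h_ * w).toNat (-1 : Int)).length = (h_ * w).toNat := by simp
  have hinit : ∀ x, InR h_ w x →
      vAt w (PySem.List.pySetD (List.replicate (h_ * w).toNat (-1 : Int)) (n.1 * w + n.2) 0) x
        = if x = n then 0 else -1 := by
    intro x hx
    rw [vAt_set_cases h_ w _ n x 0 hlen0 hnI hx]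
    split
    · rfl
    · exact vAt_replicate h_ w x hx
  have hI : BInv h_ w cmap n
      (PySem.List.pySetD (List.replicate (h_ * w).toNat (-1 : Int)) (n.1 * w + n.2) 0) [n] := by
    refine ⟨by simp [PySem.List.length_pySetD], ?_, ?_, ?_, ?_, ?_, ?_, ?_⟩
    · intro x hx
      have : x = n := by simpa using hx
      subst this
      rw [hinit x hnI]
      simp [hn]
    · rw [hinit n hnI]; simp
    · intro x hx; rw [hinit x hx]; split <;> omega
    · intro x hx hxn; rw [hinit x hx]; simp [hxn]
    · intro x hx hno
      rw [hinit x hx]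
      split
      · rename_i he; exact absurd (he ▸ hn) hno
      · rfl
    · intro x hOx hge
      rw [hinit x (opn_inR h_ w cmap x hOx)] at hge
      by_cases hxn : x = n
      · subst hxn; exact Relation.ReflTransGen.refl
      · rw [if_neg hxn] at hge; omega
    · intro x hOx hge
      rw [hinit x (opn_inR h_ w cmap x hOx)] at hge
      by_cases hxn : x = n
      · subst hxn; exact Or.inl (by simp)
      · rw [if_neg hxn] at hge; omega
  have hcnt : (PySem.List.pySetD (List.replicate (h_ * w).toNat (-1 : Int)) (n.1 * w + n.2) 0).count (-1)
      ≤ (h_ * w).toNat := by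
    calc _ ≤ (PySem.List.pySetD (List.replicate (h_ * w).toNat (-1 : Int)) (n.1 * w + n.2) 0).length :=
          List.count_le_length
    _ = (h_ * w).toNat := by simp [PySem.List.length_pySetD]
  have hF := bfs_loop h_ w cmap n hn (4 * (h_ * w).toNat + 4) _ [n] hI (by simp; omega)
  constructor
  · intro hpos
    have hOp : Opn h_ w cmap p := by
      by_contra hno
      rw [hF.unop p hp hno] at hpos
      omega
    refine ⟨hOp, hF.sound p hOp (by omega), ?_⟩
    intro he
    rw [he, hF.start] at hpos
    omega
  · rintro ⟨hOp, hR, hpn⟩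
    have hvis : ∀ r, Reach h_ w cmap n r → 0 ≤ vAt w (aBFS h_ w cmap (4 * (h_ * w).toNat + 4)
        (PySem.List.pySetD (List.replicate (h_ * w).toNat (-1 : Int)) (n.1 * w + n.2) 0) [n]) r := by
      intro r hr
      induction hr with
      | refl => rw [hF.start]
      | tail hab hst ihx =>
        rename_i b c
        have hOb : Opn h_ w cmap b := reach_opn h_ w cmap n b hn hab
        rcases hF.front b hOb ihx with hin | hcl
        · simp at hin
        · exact hcl c hst
    have h1 := hvis p hR
    have h2 := hF.nz p hp hpn
    omega


lemma update_append {α : Type} [BEq α] (xs : List α) :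
    ∀ s : PySem.Set α, ∃ r, PySem.Set.update s xs = s ++ r := by
  induction xs with
  | nil => intro s; exact ⟨[], by simp [PySem.Set.update]⟩
  | cons x xs ih =>
    intro s
    have hstep : PySem.Set.update s (x :: xs) = PySem.Set.update (PySem.Set.add s x) xs := rfl
    obtain ⟨r, hr⟩ := ih (PySem.Set.add s x)
    by_cases hc : PySem.Set.contains s x = true
    · exact ⟨r, by rw [hstep, hr, PySem.Set.add, if_pos hc]⟩
    · exact ⟨x :: r, by rw [hstep, hr, PySem.Set.add, if_neg hc]; simp⟩

lemma equal_self {α : Type} [BEq α] [LawfulBEq α] (s : PySem.Set α) :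
    PySem.Set.equal s s = true :=
  (PySem.Set.equal_iff s s).2 (fun _ => Iff.rfl)

lemma mem_bAdds (h_ w : Int) (cmap : List (List String)) (comp : PySem.Set (Int × Int))
    (r : Int × Int) :
    r ∈ bAdds h_ w cmap comp ↔ ∃ x ∈ comp, Stp h_ w cmap x r := by
  unfold bAdds
  rw [PySem.Set.mem_ofList]
  simp only [List.mem_flatMap, List.mem_filterMap]
  constructor
  · rintro ⟨x, hx, d, hd, hsome⟩
    by_cases ho : bIsOpen h_ w cmap (x.1 + d.1) (x.2 + d.2) = true
    · rw [if_pos ho] at hsome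
      obtain rfl : (x.1 + d.1, x.2 + d.2) = r := by simpa using hsome
      refine ⟨x, hx, ?_, ho⟩
      show (x.1 + d.1 - x.1, x.2 + d.2 - x.2) ∈ aDirs
      rw [add_sub_cancel_left, add_sub_cancel_left]
      exact hd
    · rw [if_neg ho] at hsome
      simp at hsome
  · rintro ⟨x, hx, hmem, hOr⟩
    refine ⟨x, hx, (r.1 - x.1, r.2 - x.2), hmem, ?_⟩
    have he1 : x.1 + (r.1 - x.1) = r.1 := by omega
    have he2 : x.2 + (r.2 - x.2) = r.2 := by omega
    rw [he1, he2]
    unfold Opn at hOr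
    rw [if_pos hOr]

lemma sat_sound (h_ w : Int) (cmap : List (List String)) (n : Int × Int) :
    ∀ (f : Nat) (comp : PySem.Set (Int × Int)), (∀ x ∈ comp, Reach h_ w cmap n x) →
    ∀ p ∈ bSat h_ w cmap f comp, Reach h_ w cmap n p := by
  intro f
  induction f with
  | zero => intro comp hc p hp; exact hc p hp
  | succ f ih =>
    intro comp hc p hp
    rw [bSat] at hp
    by_cases he : PySem.Set.equal (PySem.Set.union comp (bAdds h_ w cmap comp)) comp = true
    · rw [if_pos he] at hp
      exact hc p hp
    · rw [if_neg he] at hp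
      refine ih _ ?_ p hp
      intro x hx
      rcases (PySem.Set.mem_union _ _ _).1 hx with h1 | h1
      · exact hc x h1
      · obtain ⟨y, hy, hstp⟩ := (mem_bAdds h_ w cmap comp x).1 h1
        exact (hc y hy).tail hstp

lemma full_board (h_ w : Int) (cmap : List (List String)) (comp : List (Int × Int))
    (hnd : comp.Nodup) (hop : ∀ x ∈ comp, Opn h_ w cmap x)
    (hN : (h_ * w).toNat ≤ comp.length) (r : Int × Int) (hr : InR h_ w r) : r ∈ comp := by
  have hinj : ∀ x ∈ comp, ∀ y ∈ comp,
      (x.1 * w + x.2).toNat = (y.1 * w + y.2).toNat → x = y := by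
    intro x hx y hy hxy
    have hxI := opn_inR h_ w cmap x (hop x hx)
    have hyI := opn_inR h_ w cmap y (hop y hy)
    have hcx := code_bounds h_ w x hxI
    have hcy := code_bounds h_ w y hyI
    exact code_inj h_ w x y hxI hyI (by omega)
  have hnd2 : (comp.map (fun x => (x.1 * w + x.2).toNat)).Nodup := hnd.map_on hinj
  have hsub : (comp.map (fun x => (x.1 * w + x.2).toNat)).toFinset ⊆ Finset.range (h_ * w).toNat := by
    intro c hc
    rw [List.mem_toFinset] at hc
    obtain ⟨x, hx, rfl⟩ := List.mem_map.1 hc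
    exact Finset.mem_range.2 (toNat_lt_toNat_code h_ w x (opn_inR h_ w cmap x (hop x hx)))
  have hcard : (Finset.range (h_ * w).toNat).card
      ≤ (comp.map (fun x => (x.1 * w + x.2).toNat)).toFinset.card := by
    rw [List.toFinset_card_of_nodup hnd2, Finset.card_range, List.length_map]
    exact hN
  have heq := Finset.eq_of_subset_of_card_le hsub hcard
  have hmem : (r.1 * w + r.2).toNat ∈ (comp.map (fun x => (x.1 * w + x.2).toNat)).toFinset := by
    rw [heq]
    exact Finset.mem_range.2 (toNat_lt_toNat_code h_ w r hr)
  rw [List.mem_toFinset] at hmem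
  obtain ⟨x, hx, hxr⟩ := List.mem_map.1 hmem
  have hxI := opn_inR h_ w cmap x (hop x hx)
  have hcx := code_bounds h_ w x hxI
  have hcr := code_bounds h_ w r hr
  have : x = r := code_inj h_ w x r hxI hr (by omega)
  exact this ▸ hx

lemma sat_closed (h_ w : Int) (cmap : List (List String)) :
    ∀ (f : Nat) (comp : PySem.Set (Int × Int)), comp.Nodup →
    (∀ x ∈ comp, Opn h_ w cmap x) → (h_ * w).toNat ≤ f + comp.length →
    (∀ x ∈ comp, x ∈ bSat h_ w cmap f comp) ∧
    (∀ p ∈ bSat h_ w cmap f comp, ∀ r, Stp h_ w cmap p r → r ∈ bSat h_ w cmap f comp) := by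
  intro f
  induction f with
  | zero =>
    intro comp hnd hop hN
    refine ⟨fun x hx => hx, ?_⟩
    intro p hp r hstp
    exact full_board h_ w cmap comp hnd hop (by omega) r (opn_inR h_ w cmap r hstp.2)
  | succ f ih =>
    intro comp hnd hop hN
    by_cases he : PySem.Set.equal (PySem.Set.union comp (bAdds h_ w cmap comp)) comp = true
    · have hres : bSat h_ w cmap (f + 1) comp = comp := by rw [bSat, if_pos he]
      rw [hres]
      refine ⟨fun x hx => hx, ?_⟩
      intro p hp r hstp
      have hr : r ∈ PySem.Set.union comp (bAdds h_ w cmap comp) :=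
        (PySem.Set.mem_union _ _ _).2 (Or.inr ((mem_bAdds h_ w cmap comp r).2 ⟨p, hp, hstp⟩))
      exact ((PySem.Set.equal_iff _ _).1 he r).1 hr
    · have hres : bSat h_ w cmap (f + 1) comp
          = bSat h_ w cmap f (PySem.Set.union comp (bAdds h_ w cmap comp)) := by
        rw [bSat, if_neg he]
      have hnd2 : (PySem.Set.union comp (bAdds h_ w cmap comp)).Nodup :=
        PySem.Set.nodup_union _ _ hnd
      have hop2 : ∀ x ∈ PySem.Set.union comp (bAdds h_ w cmap comp), Opn h_ w cmap x := by
        intro x hx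
        rcases (PySem.Set.mem_union _ _ _).1 hx with h1 | h1
        · exact hop x h1
        · exact ((mem_bAdds h_ w cmap comp x).1 h1).choose_spec.2.2
      obtain ⟨rest, hrest⟩ := update_append (bAdds h_ w cmap comp) comp
      have hrne : rest ≠ [] := by
        intro hre
        rw [hre, List.append_nil] at hrest
        rw [show PySem.Set.union comp (bAdds h_ w cmap comp) = PySem.Set.update comp (bAdds h_ w cmap comp) from rfl, hrest] at he
        exact he (equal_self comp)
      have hlen2 : comp.length + 1 ≤ (PySem.Set.union comp (bAdds h_ w cmap comp)).length := by
        rw [show PySem.Set.union comp (bAdds h_ w cmap comp) = PySem.Set.update comp (bAdds h_ w cmap comp) from rfl, hrest, List.length_append]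
        have : rest.length ≠ 0 := fun h => hrne (List.length_eq_zero_iff.1 h)
        omega
      obtain ⟨hsub, hcl⟩ := ih (PySem.Set.union comp (bAdds h_ w cmap comp)) hnd2 hop2 (by omega)
      rw [hres]
      refine ⟨?_, hcl⟩
      intro x hx
      exact hsub x ((PySem.Set.mem_union _ _ _).2 (Or.inl hx))

lemma component_char (h_ w : Int) (cmap : List (List String)) (n : Int × Int)
    (hn : Opn h_ w cmap n) (p : Int × Int) :
    p ∈ bComponent h_ w cmap n ↔ Reach h_ w cmap n p := by
  have hofl : PySem.Set.ofList [n] = [n] := rfl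
  constructor
  · intro hp
    refine sat_sound h_ w cmap n _ _ ?_ p hp
    intro x hx
    rw [hofl] at hx
    obtain rfl : x = n := by simpa using hx
    exact Relation.ReflTransGen.refl
  · intro hR
    obtain ⟨hsub, hcl⟩ := sat_closed h_ w cmap (h_ * w).toNat (PySem.Set.ofList [n])
      (by rw [hofl]; simp)
      (fun x hx => by rw [hofl] at hx; obtain rfl := List.mem_singleton.1 hx; exact hn)
      (by rw [hofl]; simp)
    have main : ∀ r, Reach h_ w cmap n r →
        r ∈ bSat h_ w cmap (h_ * w).toNat (PySem.Set.ofList [n]) := by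
      intro r hr
      induction hr with
      | refl => exact hsub n (by rw [hofl]; simp)
      | tail hab hst ihx => exact hcl _ ihx _ hst
    exact main p hR


lemma en_snd_mem {α : Type} (l : List α) : ∀ (s : Int) (p : Int × α),
    p ∈ PySem.List.enumerate l s → p.2 ∈ l := by
  induction l with
  | nil => intro s p hp; simp [PySem.List.enumerate_nil] at hp
  | cons x xs ih =>
    intro s p hp
    rw [PySem.List.enumerate_cons] at hp
    rcases List.mem_cons.1 hp with h1 | h1
    · rw [h1]; exact List.mem_cons_self
    · exact List.mem_cons_of_mem _ (ih (s + 1) p h1)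

lemma en_lb {α : Type} (l : List α) : ∀ (s : Int) (p : Int × α),
    p ∈ PySem.List.enumerate l s → s ≤ p.1 := by
  induction l with
  | nil => intro s p hp; simp [PySem.List.enumerate_nil] at hp
  | cons x xs ih =>
    intro s p hp
    rw [PySem.List.enumerate_cons] at hp
    rcases List.mem_cons.1 hp with h1 | h1
    · rw [h1]
    · have := ih (s + 1) p h1
      omega

lemma en_exists {α : Type} (l : List α) : ∀ (s : Int) (x : α), x ∈ l →
    ∃ i, (i, x) ∈ PySem.List.enumerate l s := by
  induction l with
  | nil => intro s x hx; simp at hx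
  | cons y ys ih =>
    intro s x hx
    rw [PySem.List.enumerate_cons]
    rcases List.mem_cons.1 hx with h1 | h1
    · exact ⟨s, by rw [h1]; exact List.mem_cons_self⟩
    · obtain ⟨i, hi⟩ := ih (s + 1) x h1
      exact ⟨i, List.mem_cons_of_mem _ hi⟩

lemma en_fun {α : Type} (l : List α) : ∀ (s i : Int) (x y : α),
    (i, x) ∈ PySem.List.enumerate l s → (i, y) ∈ PySem.List.enumerate l s → x = y := by
  induction l with
  | nil => intro s i x y hx _; simp [PySem.List.enumerate_nil] at hx
  | cons z zs ih =>
    intro s i x y hx hy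
    rw [PySem.List.enumerate_cons] at hx hy
    rcases List.mem_cons.1 hx with h1 | h1 <;> rcases List.mem_cons.1 hy with h2 | h2
    · injection h1 with _ hx1
      injection h2 with _ hy1
      rw [hx1, hy1]
    · injection h1 with hi _
      have := en_lb zs (s + 1) (i, y) h2
      simp only at this
      omega
    · injection h2 with hi _
      have := en_lb zs (s + 1) (i, x) h1
      simp only at this
      omega
    · exact ih (s + 1) i x y h1 h2

lemma en_inj {α : Type} (l : List α) (hnd : l.Nodup) : ∀ (s i j : Int) (x : α),
    (i, x) ∈ PySem.List.enumerate l s → (j, x) ∈ PySem.List.enumerate l s → i = j := by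
  induction l with
  | nil => intro s i j x hx _; simp [PySem.List.enumerate_nil] at hx
  | cons z zs ih =>
    intro s i j x hx hy
    rw [PySem.List.enumerate_cons] at hx hy
    rcases List.mem_cons.1 hx with h1 | h1 <;> rcases List.mem_cons.1 hy with h2 | h2
    · injection h1 with hi _
      injection h2 with hj _
      omega
    · injection h1 with _ hx1
      have := en_snd_mem zs (s + 1) (j, x) h2
      simp only at this
      rw [hx1] at this
      exact absurd this (List.nodup_cons.1 hnd).1
    · injection h2 with _ hx2
      have := en_snd_mem zs (s + 1) (i, x) h1
      simp only at this
      rw [hx2] at this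
      exact absurd this (List.nodup_cons.1 hnd).1
    · exact ih (List.nodup_cons.1 hnd).2 (s + 1) i j x h1 h2

lemma nbrs_nodup (sr sc : Int) : (aNbrs sr sc).Nodup := by
  unfold aNbrs
  refine List.nodup_cons.2 ⟨?_, List.nodup_cons.2 ⟨?_, List.nodup_cons.2 ⟨?_,
    List.nodup_singleton _⟩⟩⟩ <;>
  · intro hmem
    simp only [List.mem_cons, List.not_mem_nil, Prod.mk.injEq, or_false] at hmem
    omega

lemma aTry_iff (h_ w : Int) (cmap : List (List String)) (sr sc : Int) (n : Int × Int) :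
    aTry h_ w cmap sr sc n = true ↔
      Opn h_ w cmap n ∧ ∃ m ∈ aNbrs sr sc, Opn h_ w cmap m ∧ Reach h_ w cmap n m ∧ m ≠ n := by
  have hguard : (decide (0 ≤ n.1) && decide (n.1 < h_) && decide (0 ≤ n.2) && decide (n.2 < w)
      && (aCell cmap n.1 n.2 == some ".")) = bIsOpen h_ w cmap n.1 n.2 := rfl
  unfold aTry
  rw [hguard]
  by_cases hg : bIsOpen h_ w cmap n.1 n.2 = true
  · rw [if_pos hg]
    have hn : Opn h_ w cmap n := hg
    simp only [List.any_eq_true, Bool.and_eq_true, decide_eq_true_eq]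
    constructor
    · rintro ⟨m, hm, ⟨⟨⟨h1, h2⟩, h3⟩, h4⟩, h5⟩
      have hmI : InR h_ w m := ⟨h1, h2, h3, h4⟩
      have := (bfs_char h_ w cmap n hn m hmI).1 h5
      exact ⟨hn, m, hm, this⟩
    · rintro ⟨_, m, hm, hOm, hRm, hne⟩
      have hmI : InR h_ w m := opn_inR h_ w cmap m hOm
      refine ⟨m, hm, ⟨⟨⟨hmI.1, hmI.2.1⟩, hmI.2.2.1⟩, hmI.2.2.2⟩, ?_⟩
      exact (bfs_char h_ w cmap n hn m hmI).2 ⟨hOm, hRm, hne⟩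
  · rw [if_neg hg]
    simp only [Bool.false_eq_true, false_iff, not_and]
    intro hn
    exact absurd hn hg

lemma bAny_iff (h_ w : Int) (cmap : List (List String)) (nbrs : List (Int × Int))
    (hnd : nbrs.Nodup) (hop : ∀ x ∈ nbrs, Opn h_ w cmap x) :
    ((PySem.List.enumerate nbrs).any (fun ip =>
        (PySem.List.enumerate nbrs).any (fun jm =>
          decide (jm.1 ≠ ip.1) && PySem.Set.contains (bComponent h_ w cmap ip.2) jm.2)) = true)
      ↔ ∃ n ∈ nbrs, ∃ m ∈ nbrs, m ≠ n ∧ Reach h_ w cmap n m := by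
  simp only [List.any_eq_true, Bool.and_eq_true, decide_eq_true_eq]
  constructor
  · rintro ⟨ip, hip, jm, hjm, hne, hcont⟩
    have hn := en_snd_mem nbrs 0 ip hip
    have hm := en_snd_mem nbrs 0 jm hjm
    have hOn := hop ip.2 hn
    have hmem := (PySem.Set.contains_iff _ _).1 hcont
    have hR := (component_char h_ w cmap ip.2 hOn jm.2).1 hmem
    refine ⟨ip.2, hn, jm.2, hm, ?_, hR⟩
    intro he
    exact hne (en_inj nbrs hnd 0 jm.1 ip.1 jm.2 (by rw [← Prod.mk.eta (p := jm)] at hjm; exact hjm)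
      (by rw [he]; rw [← Prod.mk.eta (p := ip)] at hip; exact hip))
  · rintro ⟨n, hn, m, hm, hne, hR⟩
    obtain ⟨i, hi⟩ := en_exists nbrs 0 n hn
    obtain ⟨j, hj⟩ := en_exists nbrs 0 m hm
    refine ⟨(i, n), hi, (j, m), hj, ?_, ?_⟩
    · intro he
      have he2 : j = i := he
      rw [he2] at hj
      exact hne (en_fun nbrs 0 i m n hj hi)
    · exact (PySem.Set.contains_iff _ _).2 ((component_char h_ w cmap n (hop n hn) m).2 hR)

theorem solve_eq_alt (h_ w : Int) (cmap : List (List String)) :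
    solve h_ w cmap = solve_alt h_ w cmap := by
  unfold solve solve_alt
  rw [show bFindS h_ w cmap = aFindS h_ w cmap from rfl]
  cases hS : aFindS h_ w cmap with
  | none => rfl
  | some s =>
    obtain ⟨sr, sc⟩ := s
    dsimp only
    have hLA : ((aNbrs sr sc).any (fun n => aTry h_ w cmap sr sc n)) = true ↔
        ∃ n ∈ aNbrs sr sc, Opn h_ w cmap n ∧ ∃ m ∈ aNbrs sr sc,
          Opn h_ w cmap m ∧ Reach h_ w cmap n m ∧ m ≠ n := by
      rw [List.any_eq_true]
      constructor
      · rintro ⟨n, hn, ht⟩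
        obtain ⟨hOn, hrest⟩ := (aTry_iff h_ w cmap sr sc n).1 ht
        exact ⟨n, hn, hOn, hrest⟩
      · rintro ⟨n, hn, hOn, hrest⟩
        exact ⟨n, hn, (aTry_iff h_ w cmap sr sc n).2 ⟨hOn, hrest⟩⟩
    have hnd : ((aNbrs sr sc).filter (fun p => bIsOpen h_ w cmap p.1 p.2)).Nodup :=
      (nbrs_nodup sr sc).filter _
    have hop : ∀ x ∈ (aNbrs sr sc).filter (fun p => bIsOpen h_ w cmap p.1 p.2),
        Opn h_ w cmap x := fun x hx => (List.mem_filter.1 hx).2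
    have hLB := bAny_iff h_ w cmap ((aNbrs sr sc).filter (fun p => bIsOpen h_ w cmap p.1 p.2)) hnd hop
    have hiff : (∃ n ∈ (aNbrs sr sc).filter (fun p => bIsOpen h_ w cmap p.1 p.2),
          ∃ m ∈ (aNbrs sr sc).filter (fun p => bIsOpen h_ w cmap p.1 p.2),
            m ≠ n ∧ Reach h_ w cmap n m)
        ↔ ∃ n ∈ aNbrs sr sc, Opn h_ w cmap n ∧ ∃ m ∈ aNbrs sr sc,
            Opn h_ w cmap m ∧ Reach h_ w cmap n m ∧ m ≠ n := by
      constructor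
      · rintro ⟨n, hn, m, hm, hne, hR⟩
        obtain ⟨hn1, hn2⟩ := List.mem_filter.1 hn
        obtain ⟨hm1, hm2⟩ := List.mem_filter.1 hm
        exact ⟨n, hn1, hn2, m, hm1, hm2, hR, hne⟩
      · rintro ⟨n, hn1, hOn, m, hm1, hOm, hR, hne⟩
        exact ⟨n, List.mem_filter.2 ⟨hn1, hOn⟩, m, List.mem_filter.2 ⟨hm1, hOm⟩, hne, hR⟩
    have hbool : ((aNbrs sr sc).any (fun n => aTry h_ w cmap sr sc n))
        = ((PySem.List.enumerate ((aNbrs sr sc).filter (fun p => bIsOpen h_ w cmap p.1 p.2))).any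
            (fun ip =>
              (PySem.List.enumerate ((aNbrs sr sc).filter (fun p => bIsOpen h_ w cmap p.1 p.2))).any
                (fun jm =>
                  decide (jm.1 ≠ ip.1) && PySem.Set.contains (bComponent h_ w cmap ip.2) jm.2))) :=
      Bool.eq_iff_iff.mpr (hLA.trans (hLB.trans hiff).symm)
    rw [show ([(sr - 1, sc), (sr + 1, sc), (sr, sc - 1), (sr, sc + 1)] :
        List (Int × Int)) = aNbrs sr sc from rfl, ← hbool]

-- ===== VERDICT (by name: the statement is the Claim_ definition above) =====
theorem solve_spec : Claim_equal_solve := by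
  intro h_ w cmap _ _
  unfold Spec_solve
  exact solve_eq_alt h_ w cmap
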